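-- pv_equiv track=rewrite | github.com/rogue-pulsar/adventofcode | Day 12/12-1.py | path_valid
-- ===== SOURCE A (Python) =====
-- def path_valid(path):
-- 	#Check if path ends with end
-- 	if path[-1] != 'end':
-- 		return False
-- 	#Check if path goes through start more than once
-- 	if path.count('start') > 1:
-- 		return False
-- 	#Check if path has more than one instance of a given lowercase character
-- 	for location in path:
-- 		if location.islower() and path.count(location) > 1:
-- 			return False
-- 	return True
-- ===== SOURCE B (Python) =====
-- def path_valid(path):
--     if not path or path[-1] != 'end':
--         return False
--     smalls = sorted(c for c in path if c.islower())
--     return not any(x == y for x, y in zip(smalls, smalls[1:]))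
-- ===== Notes on version B (the rewrite author's own statement) =====
-- stated objective: alternative
-- what changed: Replaces the per-element full-list .count scans (and the redundant 'start' count, subsumed by the lowercase rule) with one sort of the lowercase caves followed by a single adjacent-duplicate sweep; on adversarial inputs this is O(n log n) vs A's O(n^2), but A usually short-circuits so measured speed is the same.
import Mathlib
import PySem

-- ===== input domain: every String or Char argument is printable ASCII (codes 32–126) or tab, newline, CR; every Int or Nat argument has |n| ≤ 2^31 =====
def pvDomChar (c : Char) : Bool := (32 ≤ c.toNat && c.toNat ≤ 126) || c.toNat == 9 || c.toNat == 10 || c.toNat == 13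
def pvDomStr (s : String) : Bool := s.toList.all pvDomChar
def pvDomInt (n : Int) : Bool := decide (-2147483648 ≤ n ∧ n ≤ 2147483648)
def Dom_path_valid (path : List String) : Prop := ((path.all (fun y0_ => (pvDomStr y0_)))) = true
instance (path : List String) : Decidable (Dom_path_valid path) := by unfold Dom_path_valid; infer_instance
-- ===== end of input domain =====

-- B changes the algorithm: instead of a full .count scan per element (plus a redundant
-- 'start' count), it sorts the lowercase caves once and scans adjacent pairs for a duplicate
-- (a different strategy of comparable measured cost; A usually short-circuits early).

-- shared helper: Python's str.islower() on the ASCII domain — at least one cased (alphabetic)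
-- character and no uppercase character
def strIslower (s : String) : Bool :=
  s.toList.any PySem.Chars.islower && s.toList.all (fun c => !PySem.Chars.isupper c)

-- ===== PORT A =====
def path_valid (path : List String) : Bool :=
  match PySem.List.pyGet? path (-1) with
  | none => false  -- IndexError on empty path; excluded by Pre_
  | some last =>
    if last ≠ "end" then false
    else if 1 < PySem.List.count path "start" then false
    else if path.any (fun location => strIslower location && 1 < PySem.List.count path location)
      then false
    else true

-- ===== PORT B =====
def path_valid_alt (path : List String) : Bool :=
  match path.getLast? with
  | none => false  -- `not path`
  | some last =>
    if last ≠ "end" then false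
    else
      let smalls := PySem.List.sorted (path.filter strIslower) id
      !((smalls.zip (smalls.drop 1)).any (fun p => p.1 == p.2))

-- ===== PRECONDITION & SPEC =====
-- Pre_ excludes only the empty path, where A raises IndexError on path[-1].
def Pre_path_valid (path : List String) : Prop := path ≠ []
instance (path : List String) : Decidable (Pre_path_valid path) := by unfold Pre_path_valid; infer_instance
def pvWitness_path_valid : List String := (["start", "A", "b", "end"])

def Spec_path_valid (path : List String) (out : Bool) : Prop := out = path_valid_alt path
instance (path : List String) (out : Bool) : Decidable (Spec_path_valid path out) := by unfold Spec_path_valid; infer_instance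

-- ===== CLAIM (what is proved, stated in full; the proofs are below) =====
def Claim_equal_path_valid : Prop := ∀ (path : List String), Dom_path_valid path → Pre_path_valid path → Spec_path_valid path (path_valid path)

-- ===== LEMMAS AND PROOFS =====

-- adjacent-duplicate sweep on a (≤)-pairwise list detects exactly non-Nodup
theorem adjDup_iff_not_nodup (l : List String) (h : l.Pairwise (· ≤ ·)) :
    ((l.zip (l.drop 1)).any (fun p => p.1 == p.2) = true) ↔ ¬ l.Nodup := by
  induction l with
  | nil => simp
  | cons a t ih =>
    cases t with
    | nil => simp
    | cons b t' =>
      have h' : (b :: t').Pairwise (· ≤ ·) := h.tail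
      have hab : a ≤ b := (List.pairwise_cons.1 h).1 b (by simp)
      have hrest := ih h'
      simp only [List.drop_one, List.tail_cons, List.zip_cons_cons, List.any_cons, Bool.or_eq_true,
        beq_iff_eq, List.nodup_cons] at *
      constructor
      · rintro (rfl | hd)
        · intro ⟨hna, _⟩; exact hna (by simp)
        · intro ⟨_, hn⟩; exact (hrest.1 hd) hn
      · intro hn
        by_cases hd : a = b
        · exact Or.inl hd
        · right
          apply hrest.2
          intro hnd
          apply hn
          refine ⟨?_, hnd⟩
          intro hmem
          rcases List.mem_cons.1 hmem with rfl | hmem'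
          · exact hd rfl
          · have hb : ∀ x ∈ t', b ≤ x := (List.pairwise_cons.1 h').1
            have : b ≤ a := hb a hmem'
            exact hd (le_antisymm hab this)

theorem count_filter_self (path : List String) (a : String) (ha : strIslower a = true) :
    (path.filter strIslower).count a = path.count a := by
  simp [List.count_filter, ha]

-- A's scan (with the subsumed 'start' check) finds a repeated lowercase cave iff the
-- lowercase filter is not Nodup
theorem scan_iff (path : List String) :
    (path.any (fun location => strIslower location && 1 < PySem.List.count path location) = true)
      ↔ ¬ (path.filter strIslower).Nodup := by
  rw [List.nodup_iff_count_le_one]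
  simp only [List.any_eq_true, Bool.and_eq_true, decide_eq_true_eq, PySem.List.count_eq, not_forall]
  constructor
  · rintro ⟨x, hx, hl, hc⟩
    exact ⟨x, by rw [count_filter_self path x hl]; omega⟩
  · rintro ⟨x, hc⟩
    have hxmem : x ∈ path.filter strIslower := List.count_pos_iff.1 (by omega)
    have hl : strIslower x = true := List.of_mem_filter hxmem
    refine ⟨x, List.mem_of_mem_filter hxmem, hl, ?_⟩
    rw [count_filter_self path x hl] at hc; omega

theorem strIslower_start : strIslower "start" = true := by decide

-- ===== VERDICT (by name: the statement is the Claim_ definition above) =====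
theorem path_valid_spec : Claim_equal_path_valid := by
  intro path _ hpre
  unfold Spec_path_valid path_valid path_valid_alt
  have hg : PySem.List.pyGet? path (-1) = path.getLast? := PySem.List.pyGet?_neg_one path
  rw [hg]
  rcases hl : path.getLast? with _ | last
  · rfl
  · simp only []
    by_cases hend : last ≠ "end"
    · simp [hend]
    · simp only [hend, if_false]
      -- both tails: show scans agree
      have hsorted : (PySem.List.sorted (path.filter strIslower) id).Pairwise (· ≤ ·) := by
        have := PySem.List.sorted_pairwise (path.filter strIslower) id
        simpa using this
      have hperm : (PySem.List.sorted (path.filter strIslower) id).Perm (path.filter strIslower) :=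
        PySem.List.sorted_perm _ _ _
      have hadj := adjDup_iff_not_nodup _ hsorted
      rw [hperm.nodup_iff] at hadj
      have hscan := scan_iff path
      by_cases hstart : 1 < PySem.List.count path "start"
      · -- start counted twice ⇒ lowercase scan also fires ⇒ B finds an adjacent dup
        have hmem : "start" ∈ path := by
          rw [PySem.List.count_eq] at hstart
          exact List.count_pos_iff.1 (by omega)
        have hfire : path.any (fun location => strIslower location && 1 < PySem.List.count path location) = true := by
          simp only [List.any_eq_true]
          refine ⟨"start", hmem, ?_⟩
          rw [PySem.List.count_eq] at hstart ⊢
          simp [strIslower_start, hstart]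
        have : ¬ (path.filter strIslower).Nodup := hscan.1 hfire
        have : ((let smalls := PySem.List.sorted (path.filter strIslower) id;
            (smalls.zip (smalls.drop 1)).any (fun p => p.1 == p.2)) = true) := hadj.2 this
        simp only [hstart, if_true]
        simp only [this, Bool.not_true]
      · simp only [hstart, if_false]
        by_cases hfire : path.any (fun location => strIslower location && 1 < PySem.List.count path location) = true
        · have := hadj.2 (hscan.1 hfire)
          simp only [hfire, if_true]
          simp only [this, Bool.not_true]
        · have hnodup : (path.filter strIslower).Nodup := by
            by_contra hnn
            exact hfire (hscan.2 hnn)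
          have : ((PySem.List.sorted (path.filter strIslower) id).zip
              ((PySem.List.sorted (path.filter strIslower) id).drop 1)).any (fun p => p.1 == p.2) = false := by
            cases hb : (((PySem.List.sorted (path.filter strIslower) id).zip
              ((PySem.List.sorted (path.filter strIslower) id).drop 1)).any (fun p => p.1 == p.2))
            · rfl
            · exact absurd hnodup (hadj.1 hb)
          simp only [Bool.not_eq_true] at hfire
          simp only [hfire, this, Bool.not_false]
          rfl
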